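-- pv_equiv track=rewrite | github.com/chalmersplasmatheory/DREAM | py/DREAM/helpers.py | safeTeXstring
-- ===== SOURCE A (Python) =====
-- def safeTeXstring(s):
--     mappings = {
--         '#': r'\#',
--         '_': r'\_'
--     }
--
--     for key, val in mappings.items():
--         s = s.replace(key, val)
--
--     return s
-- ===== SOURCE B (Python) =====
-- def safeTeXstring(s):
--     out = ''
--     for c in s:
--         if c == '#':
--             out += '\\#'
--         elif c == '_':
--             out += '\\_'
--         else:
--             out += c
--     return out
-- ===== Notes on version B (the rewrite author's own statement) =====
-- stated objective: simpler
-- what changed: Replaces the two sequential whole-string str.replace passes with a single left-to-right scan over the characters, appending the escape for '#' and '_' (or the character itself) to an accumulator.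
import Mathlib
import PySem

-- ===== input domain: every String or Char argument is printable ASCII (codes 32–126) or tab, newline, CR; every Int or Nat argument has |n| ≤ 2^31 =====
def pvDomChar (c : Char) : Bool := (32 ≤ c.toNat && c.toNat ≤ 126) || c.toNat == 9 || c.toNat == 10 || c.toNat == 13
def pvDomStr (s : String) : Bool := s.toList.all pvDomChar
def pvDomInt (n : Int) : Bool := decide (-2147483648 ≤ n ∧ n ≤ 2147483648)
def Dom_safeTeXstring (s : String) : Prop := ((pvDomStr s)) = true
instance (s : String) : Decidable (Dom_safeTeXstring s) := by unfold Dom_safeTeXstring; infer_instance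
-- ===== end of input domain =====

-- B changes the algorithm: one left-to-right scan over the characters instead of A's two
-- whole-string replace passes (objective: simpler, same asymptotic cost).

-- ===== PORT A =====
-- for key, val in mappings.items(): s = s.replace(key, val); return s
def safeTeXstring (s : String) : String :=
  let s := PySem.Str.replace s "#" "\\#"
  let s := PySem.Str.replace s "_" "\\_"
  s

-- ===== PORT B =====
-- out = ''; for c in s: out += escape-of-c; return out
def safeTeXstring_alt (s : String) : String :=
  String.ofList
    (s.toList.foldl
      (fun out c =>
        out ++ (if c = '#' then ['\\', '#']
                else if c = '_' then ['\\', '_']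
                else [c]))
      [])

-- ===== PRECONDITION & SPEC =====
def Spec_safeTeXstring (s : String) (out : String) : Prop := out = safeTeXstring_alt s
instance (s : String) (out : String) : Decidable (Spec_safeTeXstring s out) := by unfold Spec_safeTeXstring; infer_instance

-- ===== CLAIM (what is proved, stated in full; the proofs are below) =====
def Claim_equal_safeTeXstring : Prop := ∀ (s : String), Dom_safeTeXstring s → Spec_safeTeXstring s (safeTeXstring s)

-- ===== LEMMAS AND PROOFS =====

-- replacement of a SINGLE character o by `new`, expressed as a flatMap
def replOne (o : Char) (new : List Char) (cs : List Char) : List Char :=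
  cs.flatMap (fun c => if c = o then new else [c])

theorem replace_go_single (o : Char) (new : List Char) :
    ∀ (l : List Char) (fuel : Nat) (acc : List Char), l.length ≤ fuel →
      PySem.Chars.replace.go [o] new fuel l acc = acc.reverse ++ replOne o new l := by
  intro l
  induction l with
  | nil =>
      intro fuel acc _
      cases fuel <;> simp [PySem.Chars.replace.go, replOne]
  | cons c t ih =>
      intro fuel acc hf
      cases fuel with
      | zero => simp at hf
      | succ n =>
          simp only [List.length_cons, Nat.succ_le_succ_iff] at hf
          by_cases hco : o = c
          · subst hco
            simp [PySem.Chars.replace.go, List.isPrefixOf, ih n _ hf, replOne]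
          · have hpre : [o].isPrefixOf (c :: t) = false := by
              simp [List.isPrefixOf, hco]
            simp only [PySem.Chars.replace.go, hpre, Bool.false_eq_true, if_false]
            rw [ih n (c :: acc) hf]
            simp only [replOne, List.flatMap_cons, List.reverse_cons, List.append_assoc]
            rw [if_neg (show ¬ c = o from fun h => hco h.symm)]

theorem replace_single (o : Char) (new : List Char) (cs : List Char) :
    PySem.Chars.replace cs [o] new = replOne o new cs := by
  simpa [PySem.Chars.replace] using replace_go_single o new cs cs.length [] le_rfl

-- the two single-character passes compose into one per-character escape
theorem two_pass_eq_one_pass (cs : List Char) :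
    replOne '_' ['\\', '_'] (replOne '#' ['\\', '#'] cs) =
      cs.flatMap (fun c =>
        if c = '#' then ['\\', '#'] else if c = '_' then ['\\', '_'] else [c]) := by
  induction cs with
  | nil => rfl
  | cons c t ih =>
      simp only [replOne, List.flatMap_cons, List.flatMap_append] at ih ⊢
      rw [ih]
      by_cases h1 : c = '#'
      · simp [h1]
      · by_cases h2 : c = '_'
        · simp [h2]
        · simp [h1, h2]

-- B's accumulator loop is the same flatMap
theorem alt_eq_flatMap (s : String) :
    safeTeXstring_alt s =
      String.ofList (s.toList.flatMap (fun c =>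
        if c = '#' then ['\\', '#'] else if c = '_' then ['\\', '_'] else [c])) := by
  unfold safeTeXstring_alt
  rw [PySem.List.foldl_append_eq_flatMap]
  simp

-- ===== VERDICT (by name: the statement is the Claim_ definition above) =====
theorem safeTeXstring_spec : Claim_equal_safeTeXstring := by
  intro s _
  unfold Spec_safeTeXstring safeTeXstring
  rw [alt_eq_flatMap]
  simp only [PySem.Str.replace, String.toList_ofList]
  rw [show ("#" : String).toList = ['#'] from rfl,
      show ("_" : String).toList = ['_'] from rfl,
      show ("\\#" : String).toList = ['\\', '#'] from rfl,
      show ("\\_" : String).toList = ['\\', '_'] from rfl,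
      replace_single, replace_single, two_pass_eq_one_pass]
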